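-- pv_equiv track=rewrite | github.com/ss73/TFRE40 | lab03/weather_functions.py | when_is_it_spring
-- ===== SOURCE A (Python) =====
-- def when_is_it_spring(temp_list):
--     # Keeps track of whether we have found the first day or not
--     first_found = False
--     # Keeps track of how many days with a
--     # positive temperature we have found
--     n = 0
--     # Keeps track of where the first day with positive temperatures
--     # was found
--     index = -1
--
--     # For each day (temperature value in temp_list)
--     for i, temp in enumerate(temp_list):
--         if temp > 0:
--             if not first_found:
--                 # If it is the first day where the temperature is positive:
--                 # note that the first day was found and save the index
--                 first_found = True
--                 index = i
--                 n = 1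
--             else:
--                 # Otherwise if the temperature is positive,
--                 # but the first day has already been found:
--                 # count that another day with positive temperatures
--                 # has been found
--                 n += 1
--         else:
--             # Otherwise if the temperature is negative:
--             # The series of enumerated days is broken,
--             # we must reset all variables, and mourn
--             n = 0
--             index = -1
--             first_found = False
--         if n >= 7:
--             # If a total of seven days with a positive temperature are found:
--             # Cancel, return the result and rejoice
--             return index
--     return -1
-- ===== SOURCE B (Python) =====
-- def when_is_it_spring(temp_list):
--     # Run-by-run scan: measure each maximal run of positive temperatures,
--     # return its start index if it is at least 7 days long.
--     n = len(temp_list)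
--     i = 0
--     while i < n:
--         if temp_list[i] > 0:
--             j = i
--             while j < n and temp_list[j] > 0:
--                 j += 1
--             if j - i >= 7:
--                 return i
--             i = j
--         else:
--             i += 1
--     return -1
-- ===== Notes on version B (the rewrite author's own statement) =====
-- stated objective: alternative
-- what changed: Replaces the flat element-by-element state machine threading a first_found flag, a counter and a saved index with a run-by-run scan that measures each maximal run of positive temperatures and returns its start index once a run of length >= 7 is found.
import Mathlib
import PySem

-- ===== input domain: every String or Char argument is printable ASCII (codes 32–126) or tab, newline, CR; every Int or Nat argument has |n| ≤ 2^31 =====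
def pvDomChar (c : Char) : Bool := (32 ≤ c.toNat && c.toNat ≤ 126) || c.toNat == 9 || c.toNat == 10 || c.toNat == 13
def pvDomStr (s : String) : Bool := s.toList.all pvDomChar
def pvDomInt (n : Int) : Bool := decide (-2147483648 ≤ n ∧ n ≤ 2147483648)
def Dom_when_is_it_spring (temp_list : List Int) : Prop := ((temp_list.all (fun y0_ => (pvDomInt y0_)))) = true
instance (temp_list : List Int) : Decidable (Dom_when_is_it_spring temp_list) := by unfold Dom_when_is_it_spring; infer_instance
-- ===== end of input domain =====

-- B replaces A's flag/counter/index state machine with a run-by-run scan over maximal positive runs (alternative decomposition; same return values, same O(n) cost).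


-- ===== PORT A =====
def aGo : List Int → Int → Bool → Int → Int → Int
  | [], _, _, _, _ => -1
  | t :: restL, i, first_found, n, index =>
    let s : Bool × Int × Int :=
      if t > 0 then
        if !first_found then (true, 1, i)
        else (first_found, n + 1, index)
      else (false, 0, -1)
    if s.2.1 ≥ 7 then s.2.2
    else aGo restL (i + 1) s.1 s.2.1 s.2.2

def when_is_it_spring (temp_list : List Int) : Int :=
  aGo temp_list 0 false 0 (-1)


-- ===== PORT B =====
-- length of the leading run of positive temperatures (Source B's inner counting loop; the suffix recursion mirrors the index i)
def runLen : List Int → Nat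
  | [] => 0
  | x :: xs => if x > 0 then runLen xs + 1 else 0

def altGo : List Int → Int → Int
  | [], _ => -1
  | x :: xs, i =>
    if h : x > 0 then
      let k := runLen (x :: xs)
      if (k : Int) ≥ 7 then i
      else altGo ((x :: xs).drop k) (i + (k : Int))
    else altGo xs (i + 1)
  termination_by L _ => L.length
  decreasing_by
  · simp [runLen, h]
  · simp

def when_is_it_spring_alt (temp_list : List Int) : Int :=
  altGo temp_list 0


-- ===== PRECONDITION & SPEC =====
def Spec_when_is_it_spring (temp_list : List Int) (out : Int) : Prop := out = when_is_it_spring_alt temp_list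
instance (temp_list : List Int) (out : Int) : Decidable (Spec_when_is_it_spring temp_list out) := by unfold Spec_when_is_it_spring; infer_instance

-- ===== CLAIM (what is proved, stated in full; the proofs are below) =====
def Claim_equal_when_is_it_spring : Prop := ∀ (temp_list : List Int), Dom_when_is_it_spring temp_list → Spec_when_is_it_spring temp_list (when_is_it_spring temp_list)

-- ===== LEMMAS AND PROOFS =====


lemma head_drop_runLen_nonpos (L : List Int) (y : Int) (rest : List Int)
    (h : L.drop (runLen L) = y :: rest) : y ≤ 0 := by
  induction L with
  | nil => simp at h
  | cons x xs ih =>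
    by_cases hx : x > 0
    · simp [runLen, hx] at h
      exact ih h
    · simp [runLen, hx] at h
      omega

-- inside a run: A's loop with first_found = true, 1 ≤ n ≤ 6, counts the rest of the run
lemma aGo_run (L : List Int) (i n idx : Int) (h1 : 1 ≤ n) (h6 : n ≤ 6) :
    aGo L i true n idx =
      if (runLen L : Int) ≥ 7 - n then idx
      else match L.drop (runLen L) with
        | [] => (-1 : Int)
        | _ :: rest => aGo rest (i + (runLen L : Int) + 1) false 0 (-1) := by
  induction L generalizing i n idx with
  | nil =>
    have hc : ¬ ((runLen ([] : List Int) : Int) ≥ 7 - n) := by simp [runLen]; omega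
    rw [if_neg hc]
    simp [aGo, runLen]
  | cons x xs ih =>
    by_cases hx : x > 0
    · have hk : runLen (x :: xs) = runLen xs + 1 := by simp [runLen, hx]
      by_cases h7 : n + 1 ≥ 7
      · have hcond : (runLen (x :: xs) : Int) ≥ 7 - n := by rw [hk]; push_cast; omega
        simp [aGo, hx, h7, hcond]
      · have hrw : aGo (x :: xs) i true n idx = aGo xs (i + 1) true (n + 1) idx := by
          simp [aGo, hx, h7]
        rw [hrw, ih (i + 1) (n + 1) idx (by omega) (by omega)]
        have hc : ((runLen xs : Int) ≥ 7 - (n + 1)) ↔ ((runLen (x :: xs) : Int) ≥ 7 - n) := by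
          rw [hk]; push_cast; omega
        have hd : xs.drop (runLen xs) = (x :: xs).drop (runLen (x :: xs)) := by
          rw [hk]; simp
        have hi : i + 1 + (runLen xs : Int) + 1 = i + (runLen (x :: xs) : Int) + 1 := by
          rw [hk]; push_cast; ring
        by_cases hcond : (runLen xs : Int) ≥ 7 - (n + 1)
        · rw [if_pos hcond, if_pos (hc.mp hcond)]
        · rw [if_neg hcond, if_neg (fun hh => hcond (hc.mpr hh))]
          rw [← hd, ← hi]
    · have hk : runLen (x :: xs) = 0 := by simp [runLen, hx]
      have hcond : ¬ ((runLen (x :: xs) : Int) ≥ 7 - n) := by rw [hk]; push_cast; omega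
      rw [if_neg hcond, hk]
      simp only [Nat.cast_zero, List.drop_zero]
      have hz : i + (0 : Int) + 1 = i + 1 := by ring
      show aGo (x :: xs) i true n idx = aGo xs (i + (0 : Int) + 1) false 0 (-1)
      rw [hz]
      simp [aGo, hx]

lemma aGo_eq_altGo (L : List Int) (i : Int) : aGo L i false 0 (-1) = altGo L i := by
  induction hN : L.length using Nat.strong_induction_on generalizing L i with
  | _ N ih =>
    match L with
    | [] => simp [aGo, altGo]
    | x :: xs =>
      by_cases hx : x > 0
      · have hstep : aGo (x :: xs) i false 0 (-1) = aGo xs (i + 1) true 1 i := by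
          simp [aGo, hx]
        rw [hstep, aGo_run xs (i + 1) 1 i (by omega) (by omega)]
        have hk : runLen (x :: xs) = runLen xs + 1 := by simp [runLen, hx]
        rw [altGo]
        simp only [hx, dif_pos]
        have hc : ((runLen xs : Int) ≥ 7 - 1) ↔ ((runLen (x :: xs) : Int) ≥ 7) := by
          rw [hk]; push_cast; omega
        by_cases h7 : (runLen (x :: xs) : Int) ≥ 7
        · rw [if_pos (hc.mpr h7), if_pos h7]
        · rw [if_neg (fun hh => h7 (hc.mp hh)), if_neg h7]
          have hd : (x :: xs).drop (runLen (x :: xs)) = xs.drop (runLen xs) := by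
            rw [hk]; simp
          rw [hd]
          cases hdrop : xs.drop (runLen xs) with
          | nil => simp [altGo]
          | cons y rest =>
            have hy : y ≤ 0 := head_drop_runLen_nonpos xs y rest hdrop
            have hy' : ¬ (y > 0) := by omega
            have halt : altGo (y :: rest) (i + (runLen (x :: xs) : Int)) =
                altGo rest (i + (runLen (x :: xs) : Int) + 1) := by
              rw [altGo]; simp [hy']
            rw [halt]
            have h1 : (y :: rest).length = xs.length - runLen xs := by
              rw [← hdrop, List.length_drop]
            have hN' : xs.length + 1 = N := by simpa using hN
            have hlt : rest.length < N := by simp at h1; omega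
            have hi2 : i + 1 + (runLen xs : Int) + 1 = i + (runLen (x :: xs) : Int) + 1 := by
              rw [hk]; push_cast; ring
            rw [hi2]
            exact ih rest.length hlt rest _ rfl
      · have hstep : aGo (x :: xs) i false 0 (-1) = aGo xs (i + 1) false 0 (-1) := by
          simp [aGo, hx]
        have halt : altGo (x :: xs) i = altGo xs (i + 1) := by
          rw [altGo]; simp [hx]
        rw [hstep, halt]
        have hN' : xs.length + 1 = N := by simpa using hN
        exact ih xs.length (by omega) xs (i + 1) rfl

-- ===== VERDICT (by name: the statement is the Claim_ definition above) =====
theorem when_is_it_spring_spec : Claim_equal_when_is_it_spring := by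
  intro L _
  unfold Spec_when_is_it_spring when_is_it_spring when_is_it_spring_alt
  exact aGo_eq_altGo L 0
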